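-- pv_equiv track=rewrite | github.com/agosain1/SearchEngine | retrieval.py | intersect_k
-- ===== SOURCE A (Python) =====
-- def intersect_two(p1, p2):
--     i = j = 0
--     intersection = []
--
--     while i < len(p1) and j < len(p2):
--         d1, score1 = p1[i]
--         d2, score2 = p2[j]
--
--         if d1 == d2:
--             intersection.append((d1, score1+score2))
--             i += 1
--             j += 1
--         elif d1 < d2:
--             i += 1
--         else:
--             j += 1
--     return intersection
--
-- def intersect_k(lists):
--     if not lists:
--         return []
--
--     lists.sort(key = len)
--
--     result = lists[0]
--     for lst in lists[1:]:
--         result = intersect_two(result, lst)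
--         if not result:
--             break
--     return result
-- ===== SOURCE B (Python) =====
-- def intersect_k(lists):
--     if not lists:
--         return []
--
--     lists.sort(key=len)  # same in-place sort side effect as A
--
--     maps = [dict(lst) for lst in lists[1:]]
--     out = []
--     for d, s in lists[0]:
--         if all(d in m for m in maps):
--             out.append((d, s + sum(m[d] for m in maps)))
--     return out
-- ===== Notes on version B (the rewrite author's own statement) =====
-- stated objective: alternative
-- what changed: Replaces the chain of sequential two-pointer merges with one hash dict per remaining list, probed while scanning the shortest sorted list once (same in-place lists.sort(key=len) side effect).
-- outside the precondition, e.g. on intersect_k([[(2, 1), (1, 1)], [(1, 5), (2, 5)]]): A returns [(2, 6)], B returns [(2, 6), (1, 6)]; on intersect_k([[(1, 1), (1, 2)], [(1, 5)]]): A returns [(1, 6)], B returns [(1, 7)]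
import Mathlib
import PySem

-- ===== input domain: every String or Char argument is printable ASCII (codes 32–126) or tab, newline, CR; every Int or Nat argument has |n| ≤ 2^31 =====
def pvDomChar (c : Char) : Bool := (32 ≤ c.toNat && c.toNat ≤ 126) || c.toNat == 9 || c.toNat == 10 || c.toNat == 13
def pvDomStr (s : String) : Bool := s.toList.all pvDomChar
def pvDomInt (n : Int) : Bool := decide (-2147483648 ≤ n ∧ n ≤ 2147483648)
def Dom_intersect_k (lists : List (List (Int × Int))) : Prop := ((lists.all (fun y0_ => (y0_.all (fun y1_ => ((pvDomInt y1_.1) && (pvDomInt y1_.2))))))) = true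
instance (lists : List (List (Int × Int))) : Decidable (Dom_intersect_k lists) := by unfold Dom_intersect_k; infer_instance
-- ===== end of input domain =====

-- B replaces A's chain of sequential two-pointer merges by hash maps (one per remaining list)
-- probed while scanning the shortest sorted list once (alternative algorithm, similar cost);
-- A sorts `lists` in place and B repeats that mutation, so the side effect is identical and
-- the claim is about the return value.


-- ===== PORT A =====
-- while i < len(p1) and j < len(p2): … (two-pointer merge; indices are in range at every use)
def intersect_two_loop (p1 p2 : List (Int × Int)) (i j : Nat) (acc : List (Int × Int)) :
    List (Int × Int) :=
  if h : i < p1.length ∧ j < p2.length then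
    let x1 := p1[i]'h.1
    let x2 := p2[j]'h.2
    if x1.1 = x2.1 then intersect_two_loop p1 p2 (i + 1) (j + 1) (acc ++ [(x1.1, x1.2 + x2.2)])
    else if x1.1 < x2.1 then intersect_two_loop p1 p2 (i + 1) j acc
    else intersect_two_loop p1 p2 i (j + 1) acc
  else acc
termination_by p1.length - i + (p2.length - j)
decreasing_by all_goals omega

def intersect_two (p1 p2 : List (Int × Int)) : List (Int × Int) :=
  intersect_two_loop p1 p2 0 0 []

-- for lst in lists[1:]: result = intersect_two(result, lst); if not result: break
def intersect_k_loop (rest : List (List (Int × Int))) (result : List (Int × Int)) :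
    List (Int × Int) :=
  match rest with
  | [] => result
  | lst :: rs =>
    let r := intersect_two result lst
    if r = [] then r else intersect_k_loop rs r

def intersect_k (lists : List (List (Int × Int))) : List (Int × Int) :=
  if lists = [] then []
  else
    match PySem.List.sorted lists (fun l => l.length) false with  -- lists.sort(key=len)
    | [] => []
    | first :: rest => intersect_k_loop rest first

-- ===== PORT B =====
def intersect_k_alt (lists : List (List (Int × Int))) : List (Int × Int) :=
  if lists = [] then []
  else
    match PySem.List.sorted lists (fun l => l.length) false with  -- lists.sort(key=len)
    | [] => []
    | first :: rest =>
      let maps := rest.map (fun lst => PySem.Dict.ofList lst)     -- [dict(lst) for lst in lists[1:]]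
      first.foldl (fun out ds =>
        if maps.all (fun m => m.contains ds.1) then
          -- m[ds.1] is guarded by the `all` membership test, so `getD … 0` is exact here
          out ++ [(ds.1, ds.2 + (maps.map (fun m => m.getD ds.1 0)).sum)]
        else out) []

-- ===== PRECONDITION & SPEC =====
-- Pre_ excludes inputs where two or more posting lists share at least one common doc id but
-- some list is not strictly ascending in doc id: posting lists are sorted and duplicate-free
-- by construction, and on unsorted or duplicate-id input with a shared id A's two-pointer
-- output is an accidental corner no caller would specify (B's hash-lookup answer there is as
-- defensible).
def Pre_intersect_k (lists : List (List (Int × Int))) : Prop :=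
  lists.length ≤ 1
  ∨ (∀ l ∈ lists, l.Pairwise (fun a b : Int × Int => a.1 < b.1))
  ∨ ¬ ∃ p ∈ lists.headD [], ∀ l ∈ lists, p.1 ∈ l.map Prod.fst
instance (lists : List (List (Int × Int))) : Decidable (Pre_intersect_k lists) := by
  unfold Pre_intersect_k; infer_instance

def pvWitness_intersect_k : (List (List (Int × Int))) := [[(1, 2), (3, 4)], [(1, 5)]]

def Spec_intersect_k (lists : List (List (Int × Int))) (out : List (Int × Int)) : Prop :=
  out = intersect_k_alt lists
instance (lists : List (List (Int × Int))) (out : List (Int × Int)) :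
    Decidable (Spec_intersect_k lists out) := by unfold Spec_intersect_k; infer_instance

-- ===== CLAIM (what is proved, stated in full; the proofs are below) =====
def Claim_equal_intersect_k : Prop :=
  ∀ (lists : List (List (Int × Int))), Dom_intersect_k lists → Pre_intersect_k lists →
    Spec_intersect_k lists (intersect_k lists)

-- ===== LEMMAS AND PROOFS =====

-- Structural form of A's two-pointer merge.
def tpMerge : List (Int × Int) → List (Int × Int) → List (Int × Int)
  | [], _ => []
  | _ :: _, [] => []
  | x1 :: t1, x2 :: t2 =>
    if x1.1 = x2.1 then (x1.1, x1.2 + x2.2) :: tpMerge t1 t2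
    else if x1.1 < x2.1 then tpMerge t1 (x2 :: t2)
    else tpMerge (x1 :: t1) t2
termination_by l1 l2 => l1.length + l2.length

theorem intersect_two_loop_eq (p1 p2 : List (Int × Int)) :
    ∀ i j acc, intersect_two_loop p1 p2 i j acc = acc ++ tpMerge (p1.drop i) (p2.drop j) := by
  intro i j acc
  induction i, j, acc using intersect_two_loop.induct p1 p2 with
  | case1 i j acc h x1 x2 heq ih =>
    rw [intersect_two_loop, dif_pos h, if_pos heq, ih,
      List.drop_eq_getElem_cons h.1, List.drop_eq_getElem_cons (i := j) h.2]
    conv_rhs => rw [tpMerge, if_pos heq]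
    simp only [List.append_assoc, List.singleton_append]
    rfl
  | case2 i j acc h x1 x2 hne hlt ih =>
    rw [intersect_two_loop, dif_pos h, if_neg hne, if_pos hlt, ih,
      List.drop_eq_getElem_cons h.1]
    conv_rhs => rw [List.drop_eq_getElem_cons (i := j) h.2, tpMerge, if_neg hne, if_pos hlt,
      ← List.drop_eq_getElem_cons (i := j) h.2]
  | case3 i j acc h x1 x2 hne hge ih =>
    rw [intersect_two_loop, dif_pos h, if_neg hne, if_neg hge, ih]
    conv_rhs => rw [List.drop_eq_getElem_cons h.1, List.drop_eq_getElem_cons (i := j) h.2,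
      tpMerge, if_neg hne, if_neg hge, ← List.drop_eq_getElem_cons h.1]
  | case4 i j acc h =>
    rw [intersect_two_loop, dif_neg h]
    rcases Nat.lt_or_ge i p1.length with hi | hi
    · have hj : p2.length ≤ j := by omega
      rw [List.drop_eq_getElem_cons hi, List.drop_eq_nil_of_le hj, tpMerge]
      simp
    · rw [List.drop_eq_nil_of_le hi]
      cases p2.drop j <;> simp [tpMerge]

theorem intersect_two_eq (p1 p2 : List (Int × Int)) : intersect_two p1 p2 = tpMerge p1 p2 := by
  simpa [intersect_two] using intersect_two_loop_eq p1 p2 0 0 []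

-- score of doc x.1 in list l, combined with x
def hstep (l : List (Int × Int)) (x : Int × Int) : Option (Int × Int) :=
  (l.find? (fun e => e.1 == x.1)).map (fun e => (x.1, x.2 + e.2))

def SortedKeys (l : List (Int × Int)) : Prop := l.Pairwise (fun a b => a.1 < b.1)

theorem tpMerge_eq_filterMap (p1 p2 : List (Int × Int))
    (h1 : SortedKeys p1) (h2 : SortedKeys p2) :
    tpMerge p1 p2 = p1.filterMap (hstep p2) := by
  induction p1, p2 using tpMerge.induct with
  | case1 p2 => rw [tpMerge]; simp
  | case2 x1 t1 =>
    rw [tpMerge]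
    simp [hstep]
  | case3 x1 t1 x2 t2 heq ih =>
    rw [tpMerge, if_pos heq, List.filterMap_cons]
    have hfind : (x2 :: t2).find? (fun e => e.1 == x1.1) = some x2 := by
      rw [List.find?_cons_of_pos]
      simp [heq]
    rw [hstep, hfind]
    simp only [Option.map_some]
    have htcongr : t1.filterMap (hstep (x2 :: t2)) = t1.filterMap (hstep t2) := by
      apply List.filterMap_congr
      intro y hy
      have hgt : x1.1 < y.1 := (List.pairwise_cons.mp h1).1 y hy
      rw [hstep, hstep, List.find?_cons_of_neg]
      simp only [beq_iff_eq]
      omega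
    rw [htcongr, ih (List.Pairwise.of_cons h1) (List.Pairwise.of_cons h2)]
  | case4 x1 t1 x2 t2 hne hlt ih =>
    rw [tpMerge, if_neg hne, if_pos hlt, List.filterMap_cons]
    have hfind : (x2 :: t2).find? (fun e => e.1 == x1.1) = none := by
      rw [List.find?_eq_none]
      intro e he
      simp only [beq_iff_eq]
      rcases List.mem_cons.mp he with rfl | he'
      · omega
      · have : x2.1 < e.1 := (List.pairwise_cons.mp h2).1 e he'
        omega
    rw [hstep, hfind]
    simp only [Option.map_none]
    exact ih (List.Pairwise.of_cons h1) h2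
  | case5 x1 t1 x2 t2 hne hge ih =>
    rw [tpMerge, if_neg hne, if_neg hge]
    have hcongr : (x1 :: t1).filterMap (hstep (x2 :: t2)) = (x1 :: t1).filterMap (hstep t2) := by
      apply List.filterMap_congr
      intro y hy
      have hgt : x2.1 < y.1 := by
        rcases List.mem_cons.mp hy with rfl | hy'
        · omega
        · have : x1.1 < y.1 := (List.pairwise_cons.mp h1).1 y hy'
          omega
      rw [hstep, hstep, List.find?_cons_of_neg]
      simp only [beq_iff_eq]
      omega
    rw [hcongr]
    exact ih h1 (List.Pairwise.of_cons h2)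

theorem keys_filterMap_sublist (l : List (Int × Int)) (f : Int × Int → Option (Int × Int))
    (hf : ∀ x y, f x = some y → y.1 = x.1) :
    ((l.filterMap f).map Prod.fst).Sublist (l.map Prod.fst) := by
  induction l with
  | nil => simp
  | cons x t ih =>
    rw [List.filterMap_cons]
    cases hx : f x with
    | none => rw [List.map_cons]; exact ih.cons x.1
    | some y =>
      rw [List.map_cons, List.map_cons, hf x y hx]
      exact ih.cons₂ x.1

theorem sortedKeys_filterMap (l : List (Int × Int)) (f : Int × Int → Option (Int × Int))
    (hf : ∀ x y, f x = some y → y.1 = x.1) (hl : SortedKeys l) :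
    SortedKeys (l.filterMap f) := by
  have h1 : ((l.map Prod.fst).Pairwise (· < ·)) := List.pairwise_map.mpr hl
  have h2 := List.Pairwise.sublist (keys_filterMap_sublist l f hf) h1
  exact List.pairwise_map.mp h2

theorem hstep_key (l : List (Int × Int)) (x y : Int × Int) (h : hstep l x = some y) :
    y.1 = x.1 := by
  rw [hstep] at h
  cases hf : l.find? (fun e => e.1 == x.1) with
  | none => rw [hf] at h; simp at h
  | some e =>
    rw [hf] at h
    simp only [Option.map_some, Option.some.injEq] at h
    rw [← h]

def chainF : List (List (Int × Int)) → (Int × Int) → Option (Int × Int)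
  | [] => some
  | l :: ls => fun x => (hstep l x).bind (chainF ls)

theorem foldl_intersect_two_eq (ts : List (List (Int × Int))) :
    ∀ l0, SortedKeys l0 → (∀ l ∈ ts, SortedKeys l) →
      ts.foldl (fun r l => intersect_two r l) l0 = l0.filterMap (chainF ts) := by
  induction ts with
  | nil => intro l0 _ _; simp [chainF]
  | cons l ls ih =>
    intro l0 h0 hts
    have hl : SortedKeys l := hts l (List.mem_cons_self)
    rw [List.foldl_cons]
    have hstepEq : intersect_two l0 l = l0.filterMap (hstep l) := by
      rw [intersect_two_eq, tpMerge_eq_filterMap l0 l h0 hl]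
    rw [hstepEq] at *
    rw [ih (l0.filterMap (hstep l)) (sortedKeys_filterMap l0 (hstep l) (hstep_key l) h0)
      (fun l' hl' => hts l' (List.mem_cons_of_mem l hl')),
      List.filterMap_filterMap]
    rfl

theorem foldl_intersect_two_nil (ts : List (List (Int × Int))) :
    ts.foldl (fun r l => intersect_two r l) [] = [] := by
  induction ts with
  | nil => rfl
  | cons l ls ih =>
    rw [List.foldl_cons]
    have : intersect_two [] l = [] := by rw [intersect_two_eq, tpMerge]
    rw [this, ih]

theorem intersect_k_loop_eq_foldl (ts : List (List (Int × Int))) :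
    ∀ r, intersect_k_loop ts r = ts.foldl (fun r l => intersect_two r l) r := by
  induction ts with
  | nil => intro r; rfl
  | cons l ls ih =>
    intro r
    rw [intersect_k_loop, List.foldl_cons]
    by_cases hr : intersect_two r l = []
    · simp only [hr]
      simp [foldl_intersect_two_nil]
    · simp only [hr, if_neg hr]
      exact ih (intersect_two r l)

theorem chainF_eq (ts : List (List (Int × Int))) :
    ∀ x : Int × Int, chainF ts x =
      if ts.all (fun l => (l.find? (fun e => e.1 == x.1)).isSome) then
        some (x.1, x.2 + (ts.map (fun l => ((l.find? (fun e => e.1 == x.1)).map Prod.snd).getD 0)).sum)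
      else none := by
  induction ts with
  | nil => intro x; simp [chainF]
  | cons l ls ih =>
    intro x
    rw [chainF]
    cases hf : l.find? (fun e => e.1 == x.1) with
    | none =>
      simp only [hstep, hf]
      simp [hf]
    | some e =>
      simp only [hstep, hf, Option.map_some, Option.bind_some]
      rw [ih (x.1, x.2 + e.2)]
      simp only [List.all_cons, hf, Option.isSome_some, Bool.true_and, List.map_cons,
        List.sum_cons, Option.map_some, Option.getD_some]
      split_ifs with hc
      · simp only [Option.some.injEq, Prod.mk.injEq, true_and]
        ring
      · rfl

theorem get?_foldl_insert_eq_find? (l : List (Int × Int)) (k : Int) :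
    ∀ d : PySem.Dict Int Int, (l.map Prod.fst).Nodup →
      (l.foldl (fun acc p => acc.insert p.1 p.2) d).get? k =
        ((l.find? (fun e => e.1 == k)).map Prod.snd).orElse (fun _ => d.get? k) := by
  induction l with
  | nil => intro d _; simp
  | cons p t ih =>
    intro d hnd
    rw [List.foldl_cons]
    rw [List.map_cons, List.nodup_cons] at hnd
    obtain ⟨hp, ht⟩ := hnd
    by_cases hk : p.1 = k
    · have htf : t.find? (fun e => e.1 == k) = none := by
        rw [List.find?_eq_none]
        intro e he
        simp only [beq_iff_eq]
        intro hek
        exact hp (hk ▸ hek ▸ List.mem_map_of_mem he)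
      rw [ih _ ht, htf, List.find?_cons_of_pos (by simp [hk]), hk,
        PySem.Dict.get?_insert_self]
      rfl
    · rw [ih _ ht, List.find?_cons_of_neg (by simp [hk])]
      cases t.find? (fun e => e.1 == k) with
      | some e => rfl
      | none => simp [PySem.Dict.get?_insert_of_ne _ _ (fun h => hk h.symm)]

theorem get?_ofList_eq_find? (l : List (Int × Int)) (k : Int)
    (hnd : (l.map Prod.fst).Nodup) :
    (PySem.Dict.ofList l).get? k = (l.find? (fun e => e.1 == k)).map Prod.snd := by
  rw [PySem.Dict.ofList, PySem.Dict.update, get?_foldl_insert_eq_find? l k _ hnd]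
  cases l.find? (fun e => e.1 == k) with
  | some e => rfl
  | none => simp [PySem.Dict.get?_empty]

theorem filterMap_if {α β : Type} (p : α → Bool) (g : α → β) (l : List α) :
    l.filterMap (fun x => if p x then some (g x) else none) = (l.filter p).map g := by
  induction l with
  | nil => rfl
  | cons x t ih => by_cases hx : p x <;> simp [hx, ih]

theorem nodupKeys_of_sortedKeys (l : List (Int × Int)) (h : SortedKeys l) :
    (l.map Prod.fst).Nodup := by
  exact (List.pairwise_map.mpr h).imp ne_of_lt

theorem all_congr_mem {α : Type} {p q : α → Bool} {l : List α}
    (h : ∀ x ∈ l, p x = q x) : l.all p = l.all q := by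
  induction l with
  | nil => rfl
  | cons x t ih => simp_all

theorem alt_branch_eq (first : List (Int × Int)) (rest : List (List (Int × Int)))
    (hfirst : SortedKeys first) (hrest : ∀ l ∈ rest, SortedKeys l) :
    intersect_k_loop rest first =
      (first.foldl (fun out ds =>
        if (rest.map (fun lst => PySem.Dict.ofList lst)).all (fun m => m.contains ds.1) then
          out ++ [(ds.1, ds.2 + ((rest.map (fun lst => PySem.Dict.ofList lst)).map
            (fun m => m.getD ds.1 0)).sum)]
        else out) []) := by
  rw [intersect_k_loop_eq_foldl, foldl_intersect_two_eq rest first hfirst hrest,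
    PySem.List.foldl_append_if
      (p := fun ds : Int × Int =>
        (rest.map (fun lst => PySem.Dict.ofList lst)).all (fun m => m.contains ds.1))
      (f := fun ds : Int × Int =>
        (ds.1, ds.2 + ((rest.map (fun lst => PySem.Dict.ofList lst)).map
          (fun m => m.getD ds.1 0)).sum)),
    List.nil_append]
  rw [List.filterMap_congr (fun x _ => chainF_eq rest x), filterMap_if]
  have hnd : ∀ l ∈ rest, (l.map Prod.fst).Nodup :=
    fun l hl => nodupKeys_of_sortedKeys l (hrest l hl)
  have hPQ : ∀ ds : Int × Int,
      rest.all (fun l => (l.find? (fun e => e.1 == ds.1)).isSome) =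
        (rest.map (fun lst => PySem.Dict.ofList lst)).all (fun m => m.contains ds.1) := by
    intro ds
    rw [List.all_map]
    apply all_congr_mem
    intro l hl
    simp only [Function.comp_apply, PySem.Dict.contains_eq_isSome_get?,
      get?_ofList_eq_find? l ds.1 (hnd l hl), Option.isSome_map]
  have hFG : ∀ ds : Int × Int,
      (ds.1, ds.2 + (rest.map (fun l => ((l.find? (fun e => e.1 == ds.1)).map Prod.snd).getD 0)).sum) =
        (ds.1, ds.2 + ((rest.map (fun lst => PySem.Dict.ofList lst)).map
          (fun m => m.getD ds.1 0)).sum) := by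
    intro ds
    rw [List.map_map]
    congr 2
    apply congrArg List.sum
    apply List.map_congr_left
    intro l hl
    simp only [Function.comp_apply, PySem.Dict.getD_eq_get?_getD,
      get?_ofList_eq_find? l ds.1 (hnd l hl)]
  rw [List.filter_congr (fun x _ => hPQ x)]
  exact List.map_congr_left (fun x _ => hFG x)

theorem flatten_map_singleton {α : Type} (l : List α) :
    (List.map (fun x => [x]) l).flatten = l := by
  induction l with
  | nil => rfl
  | cons x t ih => simp [ih]

theorem keys_tpMerge (p1 p2 : List (Int × Int)) :
    ∀ x ∈ tpMerge p1 p2, x.1 ∈ p1.map Prod.fst ∧ x.1 ∈ p2.map Prod.fst := by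
  induction p1, p2 using tpMerge.induct with
  | case1 p2 => intro x hx; rw [tpMerge] at hx; cases hx
  | case2 x1 t1 => intro x hx; rw [tpMerge] at hx; cases hx
  | case3 x1 t1 x2 t2 heq ih =>
    intro x hx
    rw [tpMerge, if_pos heq] at hx
    rcases List.mem_cons.mp hx with rfl | hx'
    · exact ⟨by simp, by simp [heq]⟩
    · obtain ⟨h1, h2⟩ := ih x hx'
      exact ⟨List.mem_cons_of_mem _ h1, List.mem_cons_of_mem _ h2⟩
  | case4 x1 t1 x2 t2 hne hlt ih =>
    intro x hx
    rw [tpMerge, if_neg hne, if_pos hlt] at hx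
    obtain ⟨h1, h2⟩ := ih x hx
    exact ⟨List.mem_cons_of_mem _ h1, h2⟩
  | case5 x1 t1 x2 t2 hne hge ih =>
    intro x hx
    rw [tpMerge, if_neg hne, if_neg hge] at hx
    obtain ⟨h1, h2⟩ := ih x hx
    exact ⟨h1, List.mem_cons_of_mem _ h2⟩

theorem keys_foldl_intersect_two (ts : List (List (Int × Int))) :
    ∀ l0, ∀ x ∈ ts.foldl (fun r l => intersect_two r l) l0,
      x.1 ∈ l0.map Prod.fst ∧ ∀ l ∈ ts, x.1 ∈ l.map Prod.fst := by
  induction ts with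
  | nil => intro l0 x hx; exact ⟨List.mem_map_of_mem hx, by simp⟩
  | cons l ls ih =>
    intro l0 x hx
    rw [List.foldl_cons] at hx
    obtain ⟨h1, h2⟩ := ih (intersect_two l0 l) x hx
    rw [List.mem_map] at h1
    obtain ⟨y, hy, hyx⟩ := h1
    rw [intersect_two_eq] at hy
    obtain ⟨hy1, hy2⟩ := keys_tpMerge l0 l y hy
    refine ⟨hyx ▸ hy1, ?_⟩
    intro l' hl'
    rcases List.mem_cons.mp hl' with rfl | hl''
    · exact hyx ▸ hy2
    · exact h2 l' hl''

theorem contains_ofList (l : List (Int × Int)) (k : Int) :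
    (PySem.Dict.ofList l).contains k = true ↔ k ∈ l.map Prod.fst := by
  rw [PySem.Dict.contains_iff_mem_keys, PySem.Dict.ofList, PySem.Dict.update,
    PySem.Dict.keys_foldl_insert_key (key := Prod.fst) (f := fun _ x => x.2)]
  simp only [PySem.Dict.keys_empty]
  rw [show PySem.Set.update ([] : PySem.Set Int) (l.map Prod.fst) =
    PySem.Set.ofList (l.map Prod.fst) from rfl]
  exact PySem.Set.mem_ofList _ _

-- ===== VERDICT (by name: the statement is the Claim_ definition above) =====
theorem intersect_k_spec : Claim_equal_intersect_k := by
  unfold Claim_equal_intersect_k Spec_intersect_k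
  intro lists _ hpre
  by_cases hnil : lists = []
  · subst hnil; rfl
  · rw [intersect_k, intersect_k_alt, if_neg hnil, if_neg hnil]
    cases hs : PySem.List.sorted lists (fun l => l.length) false with
    | nil => rfl
    | cons first rest =>
      have hmem : ∀ l ∈ first :: rest, l ∈ lists := by
        intro l hl
        exact (PySem.List.mem_sorted _ _ _ _).mp (hs ▸ hl)
      rcases hpre with hlen | hsorted | hnocommon
      · -- a single list: rest = [] and both sides return `first` (B adds a zero score sum)
        have hrest : rest = [] := by
          have hL := PySem.List.length_sorted (xs := lists) (key := fun l => l.length) (rev := false)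
          rw [hs] at hL
          have h0 : lists.length ≠ 0 := fun h => hnil (List.length_eq_zero_iff.mp h)
          have : rest.length = 0 := by
            simp only [List.length_cons] at hL
            omega
          exact List.length_eq_zero_iff.mp this
        subst hrest
        simp [intersect_k_loop, flatten_map_singleton]
      · have hfirst : SortedKeys first := hsorted first (hmem first List.mem_cons_self)
        have hrest : ∀ l ∈ rest, SortedKeys l :=
          fun l hl => hsorted l (hmem l (List.mem_cons_of_mem first hl))
        exact alt_branch_eq first rest hfirst hrest
      · -- no doc id common to all lists: both sides return []
        have hback : ∀ l ∈ lists, l ∈ first :: rest := by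
          intro l hl
          exact hs ▸ (PySem.List.mem_sorted _ _ _ _).mpr hl
        have hno : ¬ ∃ k : Int, ∀ l ∈ lists, k ∈ l.map Prod.fst := by
          rintro ⟨k, hk⟩
          apply hnocommon
          have hhead : lists.headD [] ∈ lists := by
            cases lists with
            | nil => exact absurd rfl hnil
            | cons a t => exact List.mem_cons_self
          have hkh := hk _ hhead
          rw [List.mem_map] at hkh
          obtain ⟨p, hp, hpk⟩ := hkh
          exact ⟨p, hp, fun l hl => hpk ▸ hk l hl⟩
        have hcomm : ∀ x : Int × Int, x.1 ∈ first.map Prod.fst →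
            (∀ l ∈ rest, x.1 ∈ l.map Prod.fst) → False := by
          intro x h1 h2
          apply hno
          refine ⟨x.1, fun l hl => ?_⟩
          rcases List.mem_cons.mp (hback l hl) with rfl | hl'
          · exact h1
          · exact h2 l hl'
        have hA : intersect_k_loop rest first = [] := by
          rw [intersect_k_loop_eq_foldl, List.eq_nil_iff_forall_not_mem]
          intro x hx
          obtain ⟨h1, h2⟩ := keys_foldl_intersect_two rest first x hx
          exact hcomm x h1 h2
        have hfilter : first.filter (fun ds : Int × Int =>
            (rest.map (fun lst => PySem.Dict.ofList lst)).all (fun m => m.contains ds.1)) = [] := by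
          rw [List.filter_eq_nil_iff]
          intro x hxf hall
          rw [List.all_eq_true] at hall
          apply hcomm x (List.mem_map_of_mem hxf)
          intro l hl
          exact (contains_ofList l x.1).mp (hall _ (List.mem_map_of_mem hl))
        have hB : (first.foldl (fun out ds =>
            if (rest.map (fun lst => PySem.Dict.ofList lst)).all (fun m => m.contains ds.1) then
              out ++ [(ds.1, ds.2 + ((rest.map (fun lst => PySem.Dict.ofList lst)).map
                (fun m => m.getD ds.1 0)).sum)]
            else out) ([] : List (Int × Int))) = [] := by
          rw [PySem.List.foldl_append_if
              (p := fun ds : Int × Int =>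
                (rest.map (fun lst => PySem.Dict.ofList lst)).all (fun m => m.contains ds.1))
              (f := fun ds : Int × Int =>
                (ds.1, ds.2 + ((rest.map (fun lst => PySem.Dict.ofList lst)).map
                  (fun m => m.getD ds.1 0)).sum)),
            List.nil_append, hfilter, List.map_nil]
        exact hA.trans hB.symm
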